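-- pv_equiv track=rewrite | github.com/aver-d/dzeug | pos.py | read_parsed
-- ===== SOURCE A (Python) =====
-- from itertools import groupby, filterfalse, tee, starmap, dropwhile
-- from typing import NamedTuple
-- from operator import is_, itemgetter
--
-- class Tag(NamedTuple):
--     word:  str
--     lemma: str
--     pos:   str
--
--     def __str__(self):
--         return '%s|%s|%s' % self
--
--     def __repr__(self):
--         return 'Tag(%s|%s|%s)' % self
--
-- fst = itemgetter(0)
--
-- snd = itemgetter(1)
--
-- def read_parsed(text):
--     # Take an already parsed string or line-based iterator.
--     # Return an iterator of paragraphs in a tree form: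
--     # document -> paragraphs -> sentences -> tags -> word|lemma|tag
--     # todo: some check on input data
--
--     def nonempty(s):
--         return s.strip() != ''
--
--     def maketags(line):
--         # todo: assert the pos exists in a set of STTS tags
--         return [Tag(*part.split('|', maxsplit=2)) for part in line.split()]
--
--     lines = text.splitlines() if isinstance(text, str) else text
--     # Create two groups. Each contains lists of paragraphs and
--     # non-paragraphs (successive empty lines with no text)
--     groups = groupby(lines, key=nonempty)
--     # Remove the empty lines
--     paragraphs = map(snd, filter(fst, groups))
--     for para in paragraphs:
--         # Yield a paragraph: a list of sentences with each sentence's element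
--         # converted to the Tag datatype
--         yield list(map(maketags, para))
-- ===== SOURCE B (Python) =====
-- from typing import NamedTuple
--
-- class Tag(NamedTuple):
--     word:  str
--     lemma: str
--     pos:   str
--
--     def __str__(self):
--         return '%s|%s|%s' % self
--
--     def __repr__(self):
--         return 'Tag(%s|%s|%s)' % self
--
-- def read_parsed(text):
--     # Two staged passes instead of a grouping scan: first locate the indices of
--     # all blank lines, then slice each paragraph segment out of the line list
--     # between consecutive boundaries (segments of length > 0 only).
--     lines = text.splitlines() if isinstance(text, str) else list(text)
--     bounds = [-1] + [i for i, line in enumerate(lines) if line.strip() == ''] + [len(lines)]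
--     for lo, hi in zip(bounds, bounds[1:]):
--         if hi - lo > 1:
--             yield [[Tag(*part.split('|', maxsplit=2)) for part in line.split()]
--                    for line in lines[lo + 1:hi]]
-- ===== Notes on version B (the rewrite author's own statement) =====
-- stated objective: alternative
-- what changed: Replaces the itertools groupby/filter/map run-grouping pipeline with two staged passes: first collect the indices of all blank lines, then slice each paragraph segment out of the line list between consecutive boundary indices.
-- outside the precondition, e.g. on read_parsed('|'): A raises TypeError, B raises TypeError
import Mathlib
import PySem

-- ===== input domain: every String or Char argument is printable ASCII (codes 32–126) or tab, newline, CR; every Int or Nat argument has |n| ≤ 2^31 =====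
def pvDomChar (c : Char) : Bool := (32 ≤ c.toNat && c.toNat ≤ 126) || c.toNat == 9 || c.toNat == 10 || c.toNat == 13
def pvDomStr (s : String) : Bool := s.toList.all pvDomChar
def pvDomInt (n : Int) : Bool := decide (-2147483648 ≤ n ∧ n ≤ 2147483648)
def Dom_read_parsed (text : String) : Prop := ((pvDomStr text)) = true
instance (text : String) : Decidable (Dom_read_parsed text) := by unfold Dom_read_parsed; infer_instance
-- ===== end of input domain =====

-- B replaces the groupby/filter/map run-grouping pipeline with two staged passes:
-- collect blank-line indices, then slice paragraph segments between consecutive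
-- boundaries (objective: alternative). Equivalence is about the RETURN value
-- (list of the generator's yields) on the string-input path.

-- ===== PORT A =====
-- nonempty(s): s.strip() != ''  (here: the "is empty" test)
def pvIsEmptyLine (s : String) : Bool := PySem.Str.strip s == ""

-- Tag(*part.split('|', maxsplit=2)); under Pre_ the split has exactly 3 pieces
def pvTag (part : String) : String × String × String :=
  match PySem.Str.splitMax? part "|" 2 with
  | some [a, b, c] => (a, b, c)
  | _ => ("", "", "")

-- maketags(line)
def pvMaketags (line : String) : List (String × String × String) :=
  (PySem.Str.split₀ line).map pvTag

-- groupby(lines, key=nonempty) filtered to the true-key groups and mapped with maketags: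
-- each true group is the maximal run of nonempty lines; false-run lines are dropped.
def pvParasA : List String → List (List (List (String × String × String)))
  | [] => []
  | l :: ls =>
    if pvIsEmptyLine l then pvParasA ls
    else ((l :: ls.takeWhile (fun s => !pvIsEmptyLine s)).map pvMaketags)
           :: pvParasA (ls.dropWhile (fun s => !pvIsEmptyLine s))
termination_by ls => ls.length
decreasing_by
  · simp
  · exact Nat.lt_succ_of_le (List.length_dropWhile_le _ _)

def read_parsed (text : String) : List (List (List (String × String × String))) :=
  pvParasA (PySem.Str.splitlines text)

-- ===== PORT B =====
-- [i for i, line in enumerate(lines) if line.strip() == '']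
def pvBlanks (ls : List String) : List Int :=
  ((PySem.List.enumerate ls).filter (fun p => pvIsEmptyLine p.2)).map (·.1)

-- bounds = [-1] + blanks + [len(lines)]
def pvBoundsB (ls : List String) : List Int :=
  -1 :: pvBlanks ls ++ [(ls.length : Int)]

-- the loop over zip(bounds, bounds[1:]), collecting the yields
def read_parsed_alt (text : String) : List (List (List (String × String × String))) :=
  let ls := PySem.Str.splitlines text
  let bs := pvBoundsB ls
  (bs.zip bs.tail).foldr
    (fun p acc =>
      if p.2 - p.1 > 1 then (PySem.List.slice ls (some (p.1 + 1)) (some p.2)).map pvMaketags :: acc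
      else acc) []

-- ===== PRECONDITION & SPEC =====
-- Pre_ excludes inputs where some whitespace-separated token of a line has fewer than two '|',
-- on which Tag(*part.split('|', maxsplit=2)) raises TypeError in both A and B.
def Pre_read_parsed (text : String) : Prop :=
  ∀ l ∈ PySem.Str.splitlines text, ∀ p ∈ PySem.Str.split₀ l, 2 ≤ PySem.Str.count p "|"
instance (text : String) : Decidable (Pre_read_parsed text) := by unfold Pre_read_parsed; infer_instance

def pvWitness_read_parsed : String := "a|b|c d|e|f\n\nx|y|z"

def Spec_read_parsed (text : String) (out : List (List (List (String × String × String)))) : Prop := out = read_parsed_alt text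
instance (text : String) (out : List (List (List (String × String × String)))) : Decidable (Spec_read_parsed text out) := by unfold Spec_read_parsed; infer_instance

-- ===== CLAIM (what is proved, stated in full; the proofs are below) =====
def Claim_equal_read_parsed : Prop := ∀ (text : String), Dom_read_parsed text → Pre_read_parsed text → Spec_read_parsed text (read_parsed text)

-- ===== LEMMAS AND PROOFS =====

-- structurally recursive form of the blank-index list, used only by the proofs
def pvBlanksSpec : List String → List Int
  | [] => []
  | l :: ls => (if pvIsEmptyLine l then [(0 : Int)] else []) ++ (pvBlanksSpec ls).map (· + 1)

theorem pvBlanks_from (ls : List String) (s : Int) :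
    ((PySem.List.enumerate ls s).filter (fun p => pvIsEmptyLine p.2)).map (·.1)
      = (pvBlanksSpec ls).map (· + s) := by
  induction ls generalizing s with
  | nil => simp [pvBlanksSpec, PySem.List.enumerate_nil]
  | cons l ls ih =>
    rw [PySem.List.enumerate_cons]
    by_cases hl : pvIsEmptyLine l = true
    · simp only [List.filter_cons, hl, if_true, List.map_cons, ih (s+1), pvBlanksSpec,
        List.singleton_append, List.map_map]
      refine congrArg₂ _ (by omega) (List.map_congr_left fun x _ => by simp; ring)
    · simp only [List.filter_cons, hl, if_false, ih (s+1), pvBlanksSpec, Bool.false_eq_true,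
        List.nil_append, List.map_map]
      exact List.map_congr_left fun x _ => by simp; ring

-- pvBlanks (the enumerate/filter comprehension of port B) equals its recursive form
theorem pvBlanks_eq (ls : List String) : pvBlanks ls = pvBlanksSpec ls := by
  unfold pvBlanks
  rw [pvBlanks_from ls 0]
  simp

-- segment extraction with an explicit carried lower bound (proof-side view of B's loop)
def pvSegAux (ls : List String) : Int → List Int → List (List (List (String × String × String)))
  | _, [] => []
  | a, b :: bs =>
    if b - a > 1 then (PySem.List.slice ls (some (a + 1)) (some b)).map pvMaketags :: pvSegAux ls b bs
    else pvSegAux ls b bs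

-- B's foldr over zip(bounds, bounds[1:]) is pvSegAux with the head bound carried
theorem pvFold_eq_segAux (ls : List String) (bs : List Int) (a : Int) :
    ((a :: bs).zip bs).foldr
      (fun p acc =>
        if p.2 - p.1 > 1 then (PySem.List.slice ls (some (p.1 + 1)) (some p.2)).map pvMaketags :: acc
        else acc) []
      = pvSegAux ls a bs := by
  induction bs generalizing a with
  | nil => simp [pvSegAux]
  | cons b bs ih => simp [pvSegAux, List.zip_cons_cons, ih b]

theorem pvSegAux_skip (ls : List String) (a b : Int) (bs : List Int) (h : ¬ b - a > 1) :
    pvSegAux ls a (b :: bs) = pvSegAux ls b bs := by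
  simp only [pvSegAux, if_neg h]

theorem pvSegAux_take (ls : List String) (a b : Int) (bs : List Int) (h : b - a > 1) :
    pvSegAux ls a (b :: bs) =
      (PySem.List.slice ls (some (a + 1)) (some b)).map pvMaketags :: pvSegAux ls b bs := by
  simp only [pvSegAux, if_pos h]

theorem pvBlanksSpec_nonneg (ls : List String) : ∀ b ∈ pvBlanksSpec ls, 0 ≤ b := by
  induction ls with
  | nil => simp [pvBlanksSpec]
  | cons l ls ih =>
    intro b hb
    simp only [pvBlanksSpec, List.mem_append, List.mem_map] at hb
    rcases hb with hb | ⟨x, hx, rfl⟩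
    · split at hb <;> simp_all
    · have := ih x hx; omega

theorem pvSegAux_cons_shift (l : String) (ls : List String) (a : Int) (bs : List Int)
    (ha : -1 ≤ a) (hb : ∀ b ∈ bs, 0 ≤ b) :
    pvSegAux (l :: ls) (a + 1) (bs.map (· + 1)) = pvSegAux ls a bs := by
  induction bs generalizing a with
  | nil => simp [pvSegAux]
  | cons b bs ih =>
    have hb0 : (0:Int) ≤ b := hb b (by simp)
    have hslice : PySem.List.slice (l :: ls) (some (a + 1 + 1)) (some (b + 1))
        = PySem.List.slice ls (some (a + 1)) (some b) := by
      rw [PySem.List.slice_toNat _ (by omega) (by omega),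
          PySem.List.slice_toNat _ (by omega) hb0]
      have h1 : (a + 1 + 1).toNat = (a + 1).toNat + 1 := by omega
      rw [h1]
      have h2 : (b + 1).toNat - ((a + 1).toNat + 1) = b.toNat - (a + 1).toNat := by omega
      rw [h2, List.drop_succ_cons]
    simp only [List.map_cons, pvSegAux]
    have harith : b + 1 - (a + 1) = b - a := by ring
    rw [harith, hslice, ih b (by omega) (fun x hx => hb x (by simp [hx]))]

theorem pvSegAux_append_shift (ds ls : List String) (a : Int) (bs : List Int)
    (ha : -1 ≤ a) (hb : ∀ b ∈ bs, 0 ≤ b) :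
    pvSegAux (ds ++ ls) (a + ds.length) (bs.map (· + (ds.length : Int))) = pvSegAux ls a bs := by
  induction ds with
  | nil => simp
  | cons d ds ih =>
    have h1 : a + ((d :: ds).length : Int) = (a + ds.length) + 1 := by simp only [List.length_cons]; push_cast; ring
    have h2 : bs.map (· + ((d :: ds).length : Int)) = (bs.map (· + (ds.length : Int))).map (· + 1) := by
      simp only [List.map_map]
      exact List.map_congr_left fun x _ => by
        simp only [Function.comp_apply, List.length_cons]; push_cast; ring
    rw [h1, h2, List.cons_append,
        pvSegAux_cons_shift d (ds ++ ls) _ _ (by omega)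
          (fun x hx => by obtain ⟨y, hy, rfl⟩ := List.mem_map.mp hx; have := hb y hy; omega),
        ih]

theorem pvBlanksSpec_decomp (ls : List String) :
    pvBlanksSpec ls = (pvBlanksSpec (ls.dropWhile (fun s => !pvIsEmptyLine s))).map
      (· + ((ls.takeWhile (fun s => !pvIsEmptyLine s)).length : Int)) := by
  induction ls with
  | nil => simp [pvBlanksSpec]
  | cons l ls ih =>
    by_cases hl : pvIsEmptyLine l = true
    · rw [List.takeWhile_cons_of_neg (by simp [hl]), List.dropWhile_cons_of_neg (by simp [hl])]
      simp
    · simp only [List.takeWhile_cons, List.dropWhile_cons, hl, Bool.not_false, if_true,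
        pvBlanksSpec, Bool.false_eq_true, if_false, List.nil_append, ih, List.map_map,
        List.length_cons]
      exact List.map_congr_left fun x _ => by simp only [Function.comp_apply]; omega


theorem pvSeg_nonblank (l : String) (ls' tw D : List String) (k : Nat)
    (htw : ls'.takeWhile (fun s => !pvIsEmptyLine s) = tw)
    (hD : ls'.dropWhile (fun s => !pvIsEmptyLine s) = D)
    (hk : tw.length = k)
    (IH : pvSegAux D (-1) (pvBlanksSpec D ++ [(D.length : Int)]) = pvParasA D) :
    pvSegAux (l :: ls') (-1)
      ((pvBlanksSpec D).map (fun x => x + ((k : Int) + 1)) ++ [(k : Int) + (D.length : Int) + 1])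
      = ((l :: tw).map pvMaketags) :: pvParasA D := by
  have hsplit : tw ++ D = ls' := by rw [← htw, ← hD]; exact List.takeWhile_append_dropWhile
  have htake : ls'.take k = tw := by
    rw [← hk, ← htw]; exact (List.prefix_iff_eq_take.mp (List.takeWhile_prefix _)).symm
  have hslice : PySem.List.slice (l :: ls') (some (-1 + 1)) (some ((k : Int) + 1))
      = l :: tw := by
    have : ((k : Int) + 1) = ((k + 1 : Nat) : Int) := by push_cast; ring
    rw [this, show (-1 + 1 : Int) = ((0 : Nat) : Int) from rfl, PySem.List.slice_natCast]
    simp [htake]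
  cases D with
  | nil =>
    simp only [pvBlanksSpec, List.map_nil, List.nil_append, List.length_nil, Nat.cast_zero]
    rw [pvSegAux_take _ _ _ _ (by omega)]
    have h0 : ((k : Int) + 0 + 1) = ((k : Int) + 1) := by ring
    rw [h0, hslice]
    simp [pvSegAux, pvParasA]
  | cons d D' =>
    have pd : pvIsEmptyLine d = true := by
      have := List.head_dropWhile_not (fun s => !pvIsEmptyLine s) (l := ls') (by simp [hD])
      simp [hD] at this
      exact this
    set R : List Int := (pvBlanksSpec D').map (· + 1) with hR
    have hspecD : pvBlanksSpec (d :: D') = 0 :: R := by simp [pvBlanksSpec, pd, hR]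
    have hRnn : ∀ b ∈ R ++ [((d :: D').length : Int)], 0 ≤ b := by
      intro b hb
      rcases List.mem_append.mp hb with h | h
      · obtain ⟨y, hy, rfl⟩ := List.mem_map.mp h
        have := pvBlanksSpec_nonneg D' y hy; omega
      · simp at h; omega
    rw [hspecD]
    simp only [List.map_cons, List.cons_append, zero_add]
    rw [pvSegAux_take _ _ _ _ (by omega), hslice]
    have harg : R.map (fun x => x + ((k : Int) + 1)) ++ [(k : Int) + ((d :: D').length : Int) + 1]
        = (R ++ [((d :: D').length : Int)]).map (fun x => x + (((l :: tw).length : Int))) := by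
      rw [List.map_append]
      congr 1
      · exact List.map_congr_left fun x _ => by simp only [List.length_cons, hk]; omega
      · have hlast : (k : Int) + ((d :: D').length : Int) + 1
            = ((d :: D').length : Int) + (((l :: tw).length : Int)) := by
          simp only [List.length_cons, hk]; omega
        rw [List.map_cons, List.map_nil, hlast]
    have hlen2 : ((k : Int) + 1) = 0 + (((l :: tw).length : Int)) := by
      simp only [List.length_cons, hk]; omega
    have hls : (l :: ls') = (l :: tw) ++ (d :: D') := by
      rw [← hsplit]; rfl
    rw [harg, hlen2, hls,
        pvSegAux_append_shift (l :: tw) (d :: D') 0 (R ++ [((d :: D').length : Int)]) (by omega) hRnn]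
    have hIH' : pvSegAux (d :: D') 0 (R ++ [((d :: D').length : Int)]) = pvParasA (d :: D') := by
      rw [← IH, hspecD, List.cons_append, pvSegAux_skip _ _ _ _ (by omega)]
    rw [hIH']
    simp

theorem pvSegs_eq_paras_aux : ∀ (n : Nat) (ls : List String), ls.length ≤ n →
    pvSegAux ls (-1) (pvBlanksSpec ls ++ [(ls.length : Int)]) = pvParasA ls := by
  intro n
  induction n with
  | zero =>
    intro ls hls
    have : ls = [] := List.eq_nil_of_length_eq_zero (Nat.le_zero.mp hls)
    subst this
    simp [pvBlanksSpec, pvSegAux, pvParasA]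
  | succ n ih =>
    intro ls hls
    match ls with
    | [] => simp [pvBlanksSpec, pvSegAux, pvParasA]
    | l :: ls' =>
      have hlen : ((l :: ls').length : Int) = (ls'.length : Int) + 1 := by
        simp only [List.length_cons]; push_cast; ring
      by_cases hl : pvIsEmptyLine l = true
      · -- blank head: skip the zero-gap pair, shift everything down by one
        rw [pvParasA]
        simp only [hl, if_true]
        simp only [pvBlanksSpec, hl, if_true, List.singleton_append, hlen]
        rw [List.cons_append, pvSegAux_skip (l :: ls') (-1) 0 _ (by omega)]
        have hmap : (pvBlanksSpec ls').map (· + 1) ++ [(ls'.length : Int) + 1]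
            = ((pvBlanksSpec ls' ++ [(ls'.length : Int)]).map (· + 1)) := by
          simp
        rw [hmap]
        have := pvSegAux_cons_shift l ls' (-1) (pvBlanksSpec ls' ++ [(ls'.length : Int)])
          (by omega)
          (fun x hx => by
            rcases List.mem_append.mp hx with h | h
            · exact pvBlanksSpec_nonneg ls' x h
            · simp at h; omega)
        simp only [neg_add_cancel] at this
        rw [this]
        exact ih ls' (by simpa using Nat.lt_succ_iff.mp (Nat.lt_of_lt_of_le (by simp) hls))
      · -- nonblank head
        have hD' : (ls'.dropWhile (fun s => !pvIsEmptyLine s)).length ≤ ls'.length :=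
          List.length_dropWhile_le _ _
        have hlen' : ls'.length = (ls'.takeWhile (fun s => !pvIsEmptyLine s)).length
            + (ls'.dropWhile (fun s => !pvIsEmptyLine s)).length := by
          have h := congrArg List.length
            (List.takeWhile_append_dropWhile (p := fun s => !pvIsEmptyLine s) (l := ls'))
          simp only [List.length_append] at h
          omega
        rw [pvParasA]
        simp only [hl, if_false, Bool.false_eq_true]
        rw [pvBlanksSpec_decomp (l :: ls')]
        simp only [List.takeWhile_cons, List.dropWhile_cons, hl, Bool.not_false, if_true]
        have e1 : ((l :: ls'.takeWhile (fun s => !pvIsEmptyLine s)).length : Int)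
            = ((ls'.takeWhile (fun s => !pvIsEmptyLine s)).length : Int) + 1 := by
          simp only [List.length_cons]; push_cast; ring
        have e2 : (((l :: ls').length : Int))
            = ((ls'.takeWhile (fun s => !pvIsEmptyLine s)).length : Int)
              + ((ls'.dropWhile (fun s => !pvIsEmptyLine s)).length : Int) + 1 := by
          simp only [List.length_cons, hlen']; push_cast; ring
        simp only [e1, e2]
        exact pvSeg_nonblank l ls' _ _ _ rfl rfl rfl
          (ih _ (by
            have : (l :: ls').length = ls'.length + 1 := rfl
            omega))

-- the main bridge, at the string input
theorem pvSegs_eq_paras (ls : List String) :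
    pvSegAux ls (-1) (pvBlanksSpec ls ++ [(ls.length : Int)]) = pvParasA ls :=
  pvSegs_eq_paras_aux ls.length ls le_rfl

-- ===== VERDICT (by name: the statement is the Claim_ definition above) =====
theorem read_parsed_spec : Claim_equal_read_parsed := by
  intro text _ _
  unfold Spec_read_parsed read_parsed read_parsed_alt pvBoundsB
  dsimp only
  rw [List.cons_append, List.tail_cons, pvFold_eq_segAux, pvBlanks_eq, pvSegs_eq_paras]
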